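-- pv_equiv track=rewrite | github.com/HaruyaIshizaki/learn-coding | src/LambdaFunction/DecoratorPattern/timerDecorator.py | on2func
-- ===== SOURCE A (Python) =====
-- def on2func(x):
--     finalResult = 1
--     for i in range(x):
--         result = i
--         for j in range(i):
--             result += j
--         finalResult += result
--     return finalResult
-- ===== SOURCE B (Python) =====
-- def on2func(x):
--     # closed form: 1 + C(n+1, 3) where n = max(x, 0)
--     n = max(x, 0)
--     return 1 + (n - 1) * n * (n + 1) // 6
-- ===== Notes on version B (the rewrite author's own statement) =====
-- stated objective: faster
-- what changed: Replaced the quadratic double loop accumulating i + sum(range(i)) with the closed-form formula 1 + (n-1)n(n+1)//6 (sum of triangular numbers), n = max(x,0).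
import Mathlib
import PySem

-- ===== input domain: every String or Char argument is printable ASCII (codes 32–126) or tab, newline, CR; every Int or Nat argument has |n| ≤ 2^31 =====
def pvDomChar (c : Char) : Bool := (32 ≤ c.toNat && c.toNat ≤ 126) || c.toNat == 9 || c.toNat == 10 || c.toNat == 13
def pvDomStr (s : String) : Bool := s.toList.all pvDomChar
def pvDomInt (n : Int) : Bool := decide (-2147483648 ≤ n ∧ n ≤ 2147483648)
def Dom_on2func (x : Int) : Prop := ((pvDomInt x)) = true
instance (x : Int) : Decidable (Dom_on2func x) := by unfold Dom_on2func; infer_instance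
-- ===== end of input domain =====

-- B replaces A's quadratic double loop with the closed-form 1 + (n-1)n(n+1)//6 (faster, O(1)).

-- ===== PORT A =====
def on2func (x : Int) : Int :=
  (PySem.List.pyRange 0 x 1).foldl
    (fun finalResult i =>
      finalResult + (PySem.List.pyRange 0 i 1).foldl (fun result j => result + j) i)
    1

-- ===== PORT B =====
def on2func_alt (x : Int) : Int :=
  let n := max x 0
  1 + PySem.Int.floordiv ((n - 1) * n * (n + 1)) 6

-- ===== PRECONDITION & SPEC =====
def Spec_on2func (x : Int) (out : Int) : Prop := out = on2func_alt x
instance (x : Int) (out : Int) : Decidable (Spec_on2func x out) := by unfold Spec_on2func; infer_instance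

-- ===== CLAIM (what is proved, stated in full; the proofs are below) =====
def Claim_equal_on2func : Prop := ∀ (x : Int), Dom_on2func x → Spec_on2func x (on2func x)

-- ===== LEMMAS AND PROOFS =====

-- the inner loop: fold of (+) starting from c over range 0..n-1
theorem pv_inner (n : Nat) (c : Int) :
    (PySem.List.pyRange 0 (n : Int) 1).foldl (fun result j => result + j) c
      = c + ((n : Int) * ((n : Int) - 1)) / 2 := by
  induction n generalizing c with
  | zero => simp [PySem.List.pyRange_one_eq_nil]
  | succ k ih =>
    have h : (PySem.List.pyRange 0 ((k : Int) + 1) 1)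
        = PySem.List.pyRange 0 (k : Int) 1 ++ [(k : Int)] :=
      PySem.List.pyRange_one_succ_right (by positivity)
    have hdvd : (2 : Int) ∣ (k : Int) * ((k : Int) - 1) := Int.even_mul_pred_self k |>.two_dvd
    push_cast
    rw [h, List.foldl_append, ih]
    simp only [List.foldl_cons, List.foldl_nil]
    obtain ⟨m, hm⟩ := hdvd
    have hm2 : ((k : Int) + 1) * ((k : Int) + 1 - 1) = 2 * (m + k) := by ring_nf; ring_nf at hm; omega
    rw [hm, hm2, Int.mul_ediv_cancel_left _ (by norm_num), Int.mul_ediv_cancel_left _ (by norm_num)]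
    ring

-- A's value, characterised: 6*(on2func n - 1) = (n-1)n(n+1) for n ≥ 0
theorem pv_outer (n : Nat) :
    6 * (on2func (n : Int) - 1) = ((n : Int) - 1) * (n : Int) * ((n : Int) + 1) := by
  induction n with
  | zero => simp [on2func, PySem.List.pyRange_one_eq_nil]
  | succ k ih =>
    have h : (PySem.List.pyRange 0 ((k : Int) + 1) 1)
        = PySem.List.pyRange 0 (k : Int) 1 ++ [(k : Int)] :=
      PySem.List.pyRange_one_succ_right (by positivity)
    unfold on2func at ih ⊢
    push_cast
    rw [h, List.foldl_append]
    simp only [List.foldl_cons, List.foldl_nil]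
    rw [pv_inner]
    obtain ⟨m, hm⟩ := (Int.even_mul_pred_self k).two_dvd
    rw [hm, Int.mul_ediv_cancel_left _ (by norm_num)]
    nlinarith [ih, hm]

-- ===== VERDICT (by name: the statement is the Claim_ definition above) =====
theorem on2func_spec : Claim_equal_on2func := by
  unfold Claim_equal_on2func
  intro x _
  unfold Spec_on2func on2func_alt
  by_cases hx : x ≤ 0
  · have hA : on2func x = 1 := by
      unfold on2func; rw [PySem.List.pyRange_one_eq_nil hx]; rfl
    have hmax : max x 0 = 0 := max_eq_right hx
    simp [hA, hmax, PySem.Int.floordiv]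
  · have hmax : max x 0 = x := max_eq_left (by omega)
    obtain ⟨n, hn⟩ : ∃ n : Nat, x = (n : Int) := ⟨x.toNat, (Int.toNat_of_nonneg (by omega)).symm⟩
    subst hn
    have h6 := pv_outer n
    show on2func (n : Int)
        = 1 + PySem.Int.floordiv ((max (n:Int) 0 - 1) * max (n:Int) 0 * (max (n:Int) 0 + 1)) 6
    rw [hmax, PySem.Int.floordiv_eq_ediv_of_pos (by norm_num)]
    have : ((n : Int) - 1) * (n : Int) * ((n : Int) + 1) = 6 * (on2func (n : Int) - 1) := h6.symm
    rw [this, Int.mul_ediv_cancel_left _ (by norm_num)]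
    ring
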